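-- pv_equiv track=rewrite | github.com/Protixer/Books | Python Crash Course 3rd Edition - Eric Matthes/loops.py | meditate
-- ===== SOURCE A (Python) =====
-- def meditate(mana, max_mana, num_potions):
--     current_mana = mana
--     maximum_posible_mana = max_mana
--     numbers_of_potions = num_potions
--
--     while True:
--         if current_mana >= maximum_posible_mana:
--             break
--         current_mana += 1
--         if numbers_of_potions >= 0:
--             break
--         numbers_of_potions -= 1
--
--     return current_mana, numbers_of_potions
-- ===== SOURCE B (Python) =====
-- def meditate(mana, max_mana, num_potions):
--     if mana >= max_mana:
--         return mana, num_potions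
--     if num_potions >= 0:
--         return mana + 1, num_potions
--     steps = max_mana - mana
--     return max_mana, num_potions - steps
-- ===== Notes on version B (the rewrite author's own statement) =====
-- stated objective: simpler
-- what changed: Replaced the while-True loop by a closed-form three-case analysis (already at max / one free step when potions are non-negative / jump straight to max_mana while charging max_mana - mana potions).
import Mathlib
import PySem

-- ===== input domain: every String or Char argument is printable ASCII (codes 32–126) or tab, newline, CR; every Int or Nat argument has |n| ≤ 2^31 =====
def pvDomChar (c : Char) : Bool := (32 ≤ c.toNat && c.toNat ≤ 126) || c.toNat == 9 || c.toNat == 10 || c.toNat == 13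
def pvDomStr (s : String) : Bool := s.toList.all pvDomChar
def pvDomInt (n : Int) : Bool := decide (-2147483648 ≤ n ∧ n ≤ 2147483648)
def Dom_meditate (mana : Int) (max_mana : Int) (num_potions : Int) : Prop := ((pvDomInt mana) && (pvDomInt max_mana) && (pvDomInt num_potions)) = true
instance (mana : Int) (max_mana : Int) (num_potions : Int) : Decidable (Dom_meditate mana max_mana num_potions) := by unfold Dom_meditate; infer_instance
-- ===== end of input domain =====

-- B replaces A's while-loop by a closed-form three-case analysis; return value proved equal.

-- ===== PORT A =====
-- literal transliteration of A's `while True` loop over the state (current_mana, numbers_of_potions)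
def meditateLoop (current_mana : Int) (maximum_posible_mana : Int) (numbers_of_potions : Int) : Int × Int :=
  if current_mana ≥ maximum_posible_mana then (current_mana, numbers_of_potions)
  else if numbers_of_potions ≥ 0 then (current_mana + 1, numbers_of_potions)
  else meditateLoop (current_mana + 1) maximum_posible_mana (numbers_of_potions - 1)
termination_by (maximum_posible_mana - current_mana).toNat
decreasing_by omega

def meditate (mana : Int) (max_mana : Int) (num_potions : Int) : Int × Int :=
  meditateLoop mana max_mana num_potions

-- ===== PORT B =====
def meditate_alt (mana : Int) (max_mana : Int) (num_potions : Int) : Int × Int :=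
  if mana ≥ max_mana then (mana, num_potions)
  else if num_potions ≥ 0 then (mana + 1, num_potions)
  else (max_mana, num_potions - (max_mana - mana))

-- ===== PRECONDITION & SPEC =====
def Spec_meditate (mana : Int) (max_mana : Int) (num_potions : Int) (out : Int × Int) : Prop := out = meditate_alt mana max_mana num_potions
instance (mana : Int) (max_mana : Int) (num_potions : Int) (out : Int × Int) : Decidable (Spec_meditate mana max_mana num_potions out) := by unfold Spec_meditate; infer_instance

-- ===== CLAIM (what is proved, stated in full; the proofs are below) =====
def Claim_equal_meditate : Prop := ∀ (mana : Int) (max_mana : Int) (num_potions : Int), Dom_meditate mana max_mana num_potions → Spec_meditate mana max_mana num_potions (meditate mana max_mana num_potions)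

-- ===== LEMMAS AND PROOFS =====
-- loop characterisation: for negative potion counts the loop ends at max_mana having spent max_mana - mana potions
theorem meditateLoop_eq (mana max_mana num_potions : Int) :
    meditateLoop mana max_mana num_potions = meditate_alt mana max_mana num_potions := by
  by_cases h : mana ≥ max_mana
  · rw [meditateLoop, meditate_alt]; simp [h]
  · by_cases hp : num_potions ≥ 0
    · rw [meditateLoop, meditate_alt]; simp [h, hp]
    · -- negative potions: induct on the remaining distance max_mana - mana
      have key : ∀ (k : ℕ) (m p : Int), p < 0 → (max_mana - m).toNat = k →
          meditateLoop m max_mana p = if m ≥ max_mana then (m, p) else (max_mana, p - (max_mana - m)) := by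
        intro k
        induction k with
        | zero =>
          intro m p hpneg hk
          have : m ≥ max_mana := by omega
          rw [meditateLoop]; simp [this]
        | succ n ih =>
          intro m p hpneg hk
          have hm : ¬ m ≥ max_mana := by omega
          rw [meditateLoop]
          simp only [hm, if_false, if_neg (by omega : ¬ p ≥ 0)]
          rw [ih (m + 1) (p - 1) (by omega) (by omega)]
          by_cases h1 : m + 1 ≥ max_mana
          · simp [h1]
            constructor
            · omega
            · omega
          · simp [h1]
            omega
      rw [key (max_mana - mana).toNat mana num_potions (by omega) rfl]
      simp [meditate_alt, h, hp]

-- ===== VERDICT (by name: the statement is the Claim_ definition above) =====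
theorem meditate_spec : Claim_equal_meditate := by
  intro mana max_mana num_potions _
  unfold Spec_meditate meditate
  exact meditateLoop_eq mana max_mana num_potions
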